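-- pv_equiv track=rewrite | github.com/EthicalHumanoid/dtmf-digit-decoder | decrypt_dtmf_to_text.py | decrypt_multitap_code
-- ===== SOURCE A (Python) =====
-- def decrypt_multitap_code(encoded_string):
--     """
--     Decrypts the DTMF encoded string.
--
--     Parameters:
--     encoded_string (str): The DTMF encoded string.
--
--     Returns:
--     str: The decoded string.
--     """
--     code_dict = {
--         '2': 'A', '22': 'B', '222': 'C', '3': 'D', '33': 'E', '333': 'F',
--         '4': 'G', '44': 'H', '444': 'I', '5': 'J', '55': 'K', '555': 'L',
--         '6': 'M', '66': 'N', '666': 'O', '7': 'P', '77': 'Q', '777': 'R', '7777': 'S',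
--         '8': 'T', '88': 'U', '888': 'V', '9': 'W', '99': 'X', '999': 'Y', '9999': 'Z'
--     }
--
--     decoded_string = ""
--     current_digit = None
--     count = 0
--
--     for digit in encoded_string.split(' '):
--         if current_digit is None or current_digit != digit:
--             if current_digit is not None:
--                 decoded_string += code_dict[current_digit][(count - 1) % len(code_dict[current_digit])]
--             current_digit = digit
--             count = 1
--         else:
--             count += 1
--
--     decoded_string += code_dict[current_digit][(count - 1) % len(code_dict[current_digit])]
--     return decoded_string
-- ===== SOURCE B (Python) =====
-- def decrypt_multitap_code(encoded_string):
--     """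
--     Decrypts the DTMF encoded string.
--
--     Parameters:
--     encoded_string (str): The DTMF encoded string.
--
--     Returns:
--     str: The decoded string.
--     """
--     keypad = {'2': 'ABC', '3': 'DEF', '4': 'GHI', '5': 'JKL',
--               '6': 'MNO', '7': 'PQRS', '8': 'TUV', '9': 'WXYZ'}
--     tokens = encoded_string.split(' ')
--     return ''.join(keypad[t[0]][len(t) - 1] for i, t in enumerate(tokens)
--                    if i == 0 or t != tokens[i - 1])
-- ===== Notes on version B (the rewrite author's own statement) =====
-- stated objective: idiomatic
-- what changed: Replaces A's current_digit/count state machine with post-loop flush and flat 26-entry token->letter dict by a comprehension that keeps the first token of each run and indexes a keypad row by press count (keypad[t[0]][len(t)-1]); the count accumulator, the trailing flush and the (count-1)%len indexing disappear.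
import Mathlib
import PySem

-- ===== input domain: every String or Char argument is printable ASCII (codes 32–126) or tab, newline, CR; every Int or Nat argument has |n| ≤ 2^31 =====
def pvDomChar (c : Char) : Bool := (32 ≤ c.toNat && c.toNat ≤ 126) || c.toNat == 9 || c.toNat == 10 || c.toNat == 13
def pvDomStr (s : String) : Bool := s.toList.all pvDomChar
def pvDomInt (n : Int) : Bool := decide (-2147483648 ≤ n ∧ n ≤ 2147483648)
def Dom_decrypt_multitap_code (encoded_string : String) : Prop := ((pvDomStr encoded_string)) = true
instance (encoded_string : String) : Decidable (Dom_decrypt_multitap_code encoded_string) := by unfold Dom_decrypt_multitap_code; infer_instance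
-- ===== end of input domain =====

-- B drops A's current_digit/count state machine (with its post-loop flush) and its flat
-- 26-entry token->letter dict: it keeps the first token of each run of equal tokens and
-- indexes a keypad row by press count (idiomatic, same cost).

-- ===== PORT A =====

-- the dict literal of A
def codeDict : PySem.Dict String String :=
  PySem.Dict.ofList
    [("2", "A"), ("22", "B"), ("222", "C"), ("3", "D"), ("33", "E"), ("333", "F"),
     ("4", "G"), ("44", "H"), ("444", "I"), ("5", "J"), ("55", "K"), ("555", "L"),
     ("6", "M"), ("66", "N"), ("666", "O"), ("7", "P"), ("77", "Q"), ("777", "R"), ("7777", "S"),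
     ("8", "T"), ("88", "U"), ("888", "V"), ("9", "W"), ("99", "X"), ("999", "Y"), ("9999", "Z")]

-- code_dict[k][(count-1) % len(code_dict[k])]; a failed lookup (Python KeyError,
-- excluded by Pre_) contributes nothing
def emitA (k : String) (count : Int) : String :=
  let s := (codeDict.get? k).getD ""
  match PySem.Str.pyGet? s (PySem.Int.mod (count - 1) (PySem.Str.len s)) with
  | some c => String.ofList [c]
  | none => ""

def decrypt_multitap_code (encoded_string : String) : String :=
  let tokens := (PySem.Str.split? encoded_string " ").getD []
  let st := tokens.foldl
    (fun (st : String × Option String × Int) digit =>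
      match st with
      | (decoded, none, _) => (decoded, some digit, 1)
      | (decoded, some cur, count) =>
        if cur ≠ digit then (decoded ++ emitA cur count, some digit, 1)
        else (decoded, some cur, count + 1))
    ("", none, 0)
  -- final flush: code_dict[current]… with current = None only for an empty token list,
  -- where Python raises (excluded by Pre_); the port flushes via the "" default then
  st.1 ++ emitA (st.2.1.getD "") st.2.2

-- ===== PORT B =====

-- the keypad-row dict of B
def keypadB : PySem.Dict String String :=
  PySem.Dict.ofList
    [("2", "ABC"), ("3", "DEF"), ("4", "GHI"), ("5", "JKL"),
     ("6", "MNO"), ("7", "PQRS"), ("8", "TUV"), ("9", "WXYZ")]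

-- keypad[t[0]][len(t) - 1]; a failed lookup or index (Python KeyError/IndexError,
-- outside Pre_) contributes nothing
def letterB (tok : String) : String :=
  let row := (keypadB.get?
    (match PySem.Str.pyGet? tok 0 with | some c => String.ofList [c] | none => "")).getD ""
  match PySem.Str.pyGet? row (PySem.Str.len tok - 1) with
  | some c => String.ofList [c]
  | none => ""

def decrypt_multitap_code_alt (encoded_string : String) : String :=
  let tokens := (PySem.Str.split? encoded_string " ").getD []
  PySem.Str.join ""
    (((PySem.List.enumerate tokens).filter
        (fun p => p.1 == 0 || PySem.List.pyGetD tokens (p.1 - 1) "" != p.2)).map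
      (fun p => letterB p.2))

-- ===== PRECONDITION & SPEC =====
-- Pre_: every space-separated token is a key of the dict (otherwise Python A raises
-- KeyError) and the token list is nonempty (it always is; stated for the final flush).
def Pre_decrypt_multitap_code (encoded_string : String) : Prop :=
  (PySem.Str.split? encoded_string " ").getD [] ≠ [] ∧
  ∀ t ∈ (PySem.Str.split? encoded_string " ").getD [], codeDict.contains t = true
instance (encoded_string : String) : Decidable (Pre_decrypt_multitap_code encoded_string) := by
  unfold Pre_decrypt_multitap_code; infer_instance

def pvWitness_decrypt_multitap_code : String := "44 33 555 555 666"

def Spec_decrypt_multitap_code (encoded_string : String) (out : String) : Prop := out = decrypt_multitap_code_alt encoded_string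
instance (encoded_string : String) (out : String) : Decidable (Spec_decrypt_multitap_code encoded_string out) := by unfold Spec_decrypt_multitap_code; infer_instance

-- ===== CLAIM (what is proved, stated in full; the proofs are below) =====
def Claim_equal_decrypt_multitap_code : Prop := ∀ (encoded_string : String), Dom_decrypt_multitap_code encoded_string → Pre_decrypt_multitap_code encoded_string → Spec_decrypt_multitap_code encoded_string (decrypt_multitap_code encoded_string)

-- ===== LEMMAS AND PROOFS =====

-- A's letter for a token, via the dict
def chrB (k : String) : String := (codeDict.get? k).getD ""

-- proof-side normal form: one letter (B's arithmetic one) per run of equal tokens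
def runMap (prev : String) : List String → String
  | [] => ""
  | b :: bs => if b = prev then runMap prev bs else letterB b ++ runMap b bs

theorem value_len (k v : String) (h : codeDict.get? k = some v) : v.toList.length = 1 := by
  have hmem : (k, v) ∈ codeDict.items := by
    unfold PySem.Dict.get? at h
    rcases Option.map_eq_some_iff.mp h with ⟨⟨k', v'⟩, hf, hv⟩
    have hk : k' = k := by simpa using List.find?_some hf
    have := List.mem_of_find?_eq_some hf
    simpa [hk, ← hv] using this
  have hv : v ∈ codeDict.items.map Prod.snd := List.mem_map_of_mem hmem
  have : ∀ w ∈ codeDict.items.map Prod.snd, w.toList.length = 1 := by decide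
  exact this v hv

theorem emitA_eq_chrB (k : String) (n : Int) : emitA k n = chrB k := by
  unfold emitA chrB
  cases h : codeDict.get? k with
  | none => simp [PySem.Str.pyGet?_eq, PySem.Chars.pyGet?_eq_listPyGet?, PySem.List.pyGet?]
  | some v =>
    have hlen := value_len k v h
    obtain ⟨c, hc⟩ : ∃ c, v.toList = [c] := by
      cases hv : v.toList with
      | nil => simp [hv] at hlen
      | cons a l => cases l with
        | nil => exact ⟨a, rfl⟩
        | cons b l' => simp [hv] at hlen
    have hmod : PySem.Int.mod (n - 1) 1 = 0 := by
      rw [PySem.Int.mod_eq_emod_of_pos (by norm_num)]; omega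
    have hlen1 : PySem.Str.len v = 1 := by simp [PySem.Str.len_eq, hc]
    have hget : PySem.Str.pyGet? v 0 = some c := by
      simp [PySem.Str.pyGet?_eq, hc, PySem.Chars.pyGet?_eq_listPyGet?]
    simp only [Option.getD_some, hlen1, hmod, hget]
    apply String.toList_inj.mp
    simp [hc]

-- on the dict's keys the keypad arithmetic agrees with the dict lookup
theorem chrB_eq_letterB (k : String) (hk : codeDict.contains k = true) : chrB k = letterB k := by
  have hmem : k ∈ codeDict.keys := (PySem.Dict.contains_iff_mem_keys _ _).mp hk
  have : ∀ k ∈ codeDict.keys, chrB k = letterB k := by decide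
  exact this k hmem

-- A's loop + flush, from a running state over key tokens, equals prefix ++ letter of the
-- open run ++ runMap
theorem loopA (ts : List String) : ∀ (d cur : String) (n : Int),
    codeDict.contains cur = true → (∀ t ∈ ts, codeDict.contains t = true) →
    (let st := ts.foldl
      (fun (st : String × Option String × Int) digit =>
        match st with
        | (decoded, none, _) => (decoded, some digit, 1)
        | (decoded, some c, count) =>
          if c ≠ digit then (decoded ++ emitA c count, some digit, 1)
          else (decoded, some c, count + 1))
      (d, some cur, n)
     st.1 ++ emitA (st.2.1.getD "") st.2.2)
    = d ++ letterB cur ++ runMap cur ts := by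
  induction ts with
  | nil =>
    intro d cur n hcur _
    simp [runMap, emitA_eq_chrB, chrB_eq_letterB cur hcur]
  | cons b bs ih =>
    intro d cur n hcur hts
    have hb' : codeDict.contains b = true := hts b (List.mem_cons_self)
    have hbs : ∀ t ∈ bs, codeDict.contains t = true := fun t ht => hts t (List.mem_cons_of_mem _ ht)
    by_cases hb : cur = b
    · subst hb
      simpa [runMap] using ih d cur (n + 1) hcur hbs
    · simp only [List.foldl_cons, if_pos hb, runMap,
        if_neg (show ¬ (b = cur) from fun h => hb h.symm)]
      rw [show d ++ letterB cur ++ (letterB b ++ runMap b bs)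
            = (d ++ emitA cur n) ++ letterB b ++ runMap b bs from by
          rw [emitA_eq_chrB, chrB_eq_letterB cur hcur]; simp [String.append_assoc]]
      exact ih (d ++ emitA cur n) b 1 hb' hbs

theorem join_empty_cons (x : String) (xs : List String) :
    PySem.Str.join "" (x :: xs) = x ++ PySem.Str.join "" xs := by
  apply String.toList_inj.mp
  cases xs with
  | nil => simp [PySem.Str.join, PySem.Chars.join_singleton, PySem.Chars.join_nil]
  | cons y ys =>
    simp [PySem.Str.join, PySem.Chars.join_cons_cons]

-- B's enumerate/filter/map over the suffix ts of the full token list pre ++ prev :: ts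
theorem filtB (ts : List String) : ∀ (pre : List String) (prev : String),
    PySem.Str.join ""
      ((((PySem.List.enumerate ts ((pre.length : Int) + 1)).filter
          (fun p => p.1 == 0 ||
            PySem.List.pyGetD (pre ++ prev :: ts) (p.1 - 1) "" != p.2)).map
        (fun p => letterB p.2)))
    = runMap prev ts := by
  induction ts with
  | nil =>
    intro pre prev
    simp [PySem.List.enumerate, runMap, PySem.Str.join, PySem.Chars.join_nil]
  | cons b bs ih =>
    intro pre prev
    rw [PySem.List.enumerate_cons]
    have hz : (((pre.length : Int) + 1) == 0) = false := by
      simp; omega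
    have hprev : PySem.List.pyGetD (pre ++ prev :: b :: bs) ((pre.length : Int) + 1 - 1) "" = prev := by
      have : ((pre.length : Int) + 1 - 1) = (pre.length : Int) := by ring
      rw [this]
      simp [PySem.List.pyGetD]
    have hre : ∀ (prev' : String),
        (PySem.List.enumerate bs ((pre.length : Int) + 1 + 1)).filter
            (fun p => p.1 == 0 ||
              PySem.List.pyGetD (pre ++ prev :: b :: bs) (p.1 - 1) "" != p.2)
        = (PySem.List.enumerate bs (((pre ++ [prev]).length : Int) + 1)).filter
            (fun p => p.1 == 0 ||
              PySem.List.pyGetD ((pre ++ [prev]) ++ b :: bs) (p.1 - 1) "" != p.2) := by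
      intro _
      simp [List.append_assoc]
    by_cases hb : b = prev
    · subst hb
      rw [List.filter_cons, if_neg (by simp [hz]), hre b, ih (pre ++ [b]) b]
      simp [runMap]
    · rw [List.filter_cons,
        if_pos (by simp only [hz, hprev, Bool.false_or, bne_iff_ne, ne_eq]; exact fun h => hb h.symm),
        List.map_cons, join_empty_cons, hre b, ih (pre ++ [prev]) b]
      simp [runMap, if_neg hb]

-- ===== VERDICT (by name: the statement is the Claim_ definition above) =====
theorem decrypt_multitap_code_spec : Claim_equal_decrypt_multitap_code := by
  intro e _ hpre
  unfold Spec_decrypt_multitap_code decrypt_multitap_code decrypt_multitap_code_alt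
  obtain ⟨hne, hkeys⟩ := hpre
  cases htok : (PySem.Str.split? e " ").getD [] with
  | nil => exact absurd htok hne
  | cons a ts =>
    rw [htok] at hkeys
    simp only [List.foldl_cons]
    rw [loopA ts "" a 1 (hkeys a List.mem_cons_self)
      (fun t ht => hkeys t (List.mem_cons_of_mem _ ht))]
    rw [PySem.List.enumerate_cons]
    rw [List.filter_cons, if_pos (by simp)]
    rw [List.map_cons, join_empty_cons]
    have h2 := filtB ts [] a
    simp only [List.nil_append, List.length_nil, Int.natCast_zero, zero_add] at h2 ⊢
    rw [h2]
    simp [String.empty_append]
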